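-- pv_equiv track=rewrite | github.com/balde-soul/Putil | data/coco.py | __get_common_id
-- ===== SOURCE A (Python) =====
-- def __get_common_id(id_lists):
--     if len(id_lists) > 1:
--         common_list = list()
--         for sample in id_lists[0]:
--             view = [(sample in id_list) if id_list is not None else True for id_list in id_lists[1:]]
--             common_list.append(sample) if False not in view else None
--             pass
--         return common_list
--     else:
--         return id_lists[0]
--     pass
-- ===== SOURCE B (Python) =====
-- def __get_common_id(id_lists):
--     if len(id_lists) > 1:
--         allowed = None
--         for id_list in id_lists[1:]:
--             if id_list is None:
--                 continue
--             s = set(id_list)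
--             allowed = s if allowed is None else allowed & s
--         if allowed is None:
--             return list(id_lists[0])
--         return [x for x in id_lists[0] if x in allowed]
--     else:
--         return id_lists[0]
-- ===== Notes on version B (the rewrite author's own statement) =====
-- stated objective: simpler
-- what changed: A scans every later list once per element of id_lists[0]; B reduces the non-None later lists into one intersection set and then filters id_lists[0] in a single membership pass.
-- outside the precondition, e.g. on __get_common_id([]): A raises IndexError, B raises IndexError; on __get_common_id([None]): A returns None, B returns None; on __get_common_id([None, [1]]): A raises TypeError, B raises TypeError
import Mathlib
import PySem

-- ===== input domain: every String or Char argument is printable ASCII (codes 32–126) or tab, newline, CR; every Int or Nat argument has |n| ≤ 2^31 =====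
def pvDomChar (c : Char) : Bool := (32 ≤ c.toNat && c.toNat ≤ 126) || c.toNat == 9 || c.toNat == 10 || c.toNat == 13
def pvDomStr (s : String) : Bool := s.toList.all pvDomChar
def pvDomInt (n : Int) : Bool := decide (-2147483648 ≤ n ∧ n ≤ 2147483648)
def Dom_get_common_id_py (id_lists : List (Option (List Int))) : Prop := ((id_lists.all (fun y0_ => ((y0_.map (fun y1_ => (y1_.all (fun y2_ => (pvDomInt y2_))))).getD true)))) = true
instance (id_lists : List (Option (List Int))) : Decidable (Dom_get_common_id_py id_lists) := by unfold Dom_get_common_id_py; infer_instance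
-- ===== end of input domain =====

-- B replaces A's per-sample scan of every later list by one intersection set built once,
-- then a single filter pass over id_lists[0] (objective: simpler; same observable values).

-- ===== PORT A =====
-- literal port of A: for each sample of id_lists[0], build the Boolean `view` over
-- id_lists[1:] and append sample iff False is not in view.
def get_common_id_py (id_lists : List (Option (List Int))) : List Int :=
  if id_lists.length > 1 then
    ((id_lists.headD none).getD []).foldl
      (fun common sample =>
        let view := (id_lists.drop 1).map
          (fun id_list => match id_list with
            | none => true
            | some l => l.contains sample)
        if view.contains false then common else common ++ [sample]) []
  else (id_lists.headD none).getD []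

-- ===== PORT B =====
-- B's set-intersection step over id_lists[1:]
def gciAllowedStep (acc : Option (PySem.Set Int)) (id_list : Option (List Int)) :
    Option (PySem.Set Int) :=
  match id_list with
  | none => acc
  | some l =>
    let s := PySem.Set.ofList l
    match acc with
    | none => some s
    | some a => some (PySem.Set.inter a s)

def get_common_id_py_alt (id_lists : List (Option (List Int))) : List Int :=
  if id_lists.length > 1 then
    let allowed := (id_lists.drop 1).foldl gciAllowedStep none
    match allowed with
    | none => (id_lists.headD none).getD []
    | some a => ((id_lists.headD none).getD []).filter (fun x => PySem.Set.contains a x)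
  else (id_lists.headD none).getD []

-- ===== PRECONDITION & SPEC =====
-- Pre_ excludes exactly the inputs where A does not return a list of ints:
-- the empty list (IndexError on id_lists[0]), a first element None with one list
-- (returns None, not a list), or a first element None with more lists (TypeError iterating None).
def Pre_get_common_id_py (id_lists : List (Option (List Int))) : Prop :=
  id_lists ≠ [] ∧ (id_lists.headD none).isSome = true
instance (id_lists : List (Option (List Int))) : Decidable (Pre_get_common_id_py id_lists) := by unfold Pre_get_common_id_py; infer_instance

def pvWitness_get_common_id_py : List (Option (List Int)) :=
  [some [1, 2, 2, 3], some [2, 3, 4], none]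

def Spec_get_common_id_py (id_lists : List (Option (List Int))) (out : List Int) : Prop := out = get_common_id_py_alt id_lists
instance (id_lists : List (Option (List Int))) (out : List Int) : Decidable (Spec_get_common_id_py id_lists out) := by unfold Spec_get_common_id_py; infer_instance

-- ===== CLAIM (what is proved, stated in full; the proofs are below) =====
def Claim_equal_get_common_id_py : Prop := ∀ (id_lists : List (Option (List Int))), Dom_get_common_id_py id_lists → Pre_get_common_id_py id_lists → Spec_get_common_id_py id_lists (get_common_id_py id_lists)

-- ===== LEMMAS AND PROOFS =====

-- the membership test B applies to x after folding gciAllowedStep from acc over rest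
def gciKeep (o : Option (PySem.Set Int)) (x : Int) : Bool :=
  match o with
  | none => true
  | some a => PySem.Set.contains a x

-- A's per-sample test over one tail entry
def gciOk (x : Int) (id_list : Option (List Int)) : Bool :=
  match id_list with
  | none => true
  | some l => l.contains x

lemma gciKeep_foldl (rest : List (Option (List Int))) (acc : Option (PySem.Set Int)) (x : Int) :
    gciKeep (rest.foldl gciAllowedStep acc) x = (gciKeep acc x && rest.all (gciOk x)) := by
  induction rest generalizing acc with
  | nil => simp [List.all]
  | cons hd tl ih =>
    cases hd with
    | none => simp [gciAllowedStep, ih, gciOk]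
    | some l =>
      simp only [List.foldl_cons]
      rw [ih]
      have hc : gciKeep (gciAllowedStep acc (some l)) x = (gciKeep acc x && l.contains x) := by
        cases acc with
        | none =>
          show (PySem.Set.ofList l).contains x = (true && l.contains x)
          by_cases hl : x ∈ l <;>
            simp [hl, PySem.Set.mem_ofList, ]
        | some a =>
          show (PySem.Set.inter a (PySem.Set.ofList l)).contains x = (a.contains x && l.contains x)
          by_cases hx : x ∈ PySem.Set.inter a (PySem.Set.ofList l)
          · have h1 := (PySem.Set.mem_inter a (PySem.Set.ofList l) x).mp hx
            rw [PySem.Set.mem_ofList l x] at h1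
            simp [hx, h1.1, h1.2, ]
          · by_cases ha : x ∈ a
            · have hl : x ∉ l := fun hl =>
                hx ((PySem.Set.mem_inter a (PySem.Set.ofList l) x).mpr
                  ⟨ha, (PySem.Set.mem_ofList l x).mpr hl⟩)
              simp [hx, ha, hl, ]
            · simp [hx, ha, ]
      rw [hc]
      cases gciKeep acc x <;> simp [gciOk]

-- A's Boolean view contains False iff some non-None tail entry misses x
lemma gciView (rest : List (Option (List Int))) (x : Int) :
    ((rest.map (fun id_list => match id_list with
        | none => true
        | some l => l.contains x)).contains false) = !(rest.all (gciOk x)) := by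
  induction rest with
  | nil => simp
  | cons h t iht =>
    cases h with
    | none => simpa [gciOk] using iht
    | some l =>
      simp only [List.map_cons, List.contains_cons, List.all_cons, gciOk, iht]
      cases hcl : l.contains x <;> simp

-- A's fold is a filter by gciOk over all tail entries
lemma gciA_fold (rest : List (Option (List Int))) (xs acc : List Int) :
    xs.foldl
      (fun common sample =>
        if ((rest.map (fun id_list => match id_list with
              | none => true
              | some l => l.contains sample)).contains false) = true
        then common else common ++ [sample]) acc
    = acc ++ xs.filter (fun x => rest.all (gciOk x)) := by
  induction xs generalizing acc with
  | nil => simp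
  | cons x xs ih =>
    cases hall : rest.all (gciOk x) <;>
      · rw [List.foldl_cons, List.filter_cons, gciView rest x, hall, ih]
        simp

-- ===== VERDICT (by name: the statement is the Claim_ definition above) =====
theorem get_common_id_py_spec : Claim_equal_get_common_id_py := by
  intro id_lists _ hpre
  unfold Spec_get_common_id_py
  obtain ⟨hne, hhead⟩ := hpre
  cases id_lists with
  | nil => exact absurd rfl hne
  | cons h0 tail0 =>
    cases h0 with
    | none => simp at hhead
    | some xs =>
      cases tail0 with
      | nil => rfl
      | cons r rs =>
        have hgt : (some xs :: r :: rs).length > 1 := by simp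
        unfold get_common_id_py get_common_id_py_alt
        rw [if_pos hgt, if_pos hgt]
        simp only [List.headD, Option.getD, List.drop_succ_cons, List.drop_zero]
        refine Eq.trans (gciA_fold (r :: rs) xs []) ?_
        cases hfold : (r :: rs).foldl gciAllowedStep none with
        | none =>
          simp only [List.nil_append]
          have hall : ∀ x : Int, (r :: rs).all (gciOk x) = true := by
            intro x
            have h := gciKeep_foldl (r :: rs) none x
            rw [hfold] at h
            simpa [gciKeep] using h.symm
          exact List.filter_eq_self.mpr (fun a _ => hall a)
        | some a =>
          simp only [List.nil_append]
          congr 1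
          funext x
          have h := gciKeep_foldl (r :: rs) none x
          rw [hfold] at h
          simpa [gciKeep] using h.symm
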